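-- pv_equiv track=rewrite | github.com/pehks1980/maap | mainapp/models.py | GetAppModeDesc
-- ===== SOURCE A (Python) =====
-- def GetAppModeDesc(list):
--     # result=[]
--     a = ''
--     b = ''
--     c = ''
--     for i in list:
--         if i == '1':
--             a = '*,'
--         if i == '2':
--             b = '+,'
--         if i == '3':
--             c = '-'
--
--     return f'{a}{b}{c}'
-- ===== SOURCE B (Python) =====
-- def GetAppModeDesc(list):
--     # One pass accumulating a 3-bit presence mask, then a table lookup of the
--     # precomputed descriptor for each of the 8 possible masks.
--     TABLE = ['', '*,', '+,', '*,+,', '-', '*,-', '+,-', '*,+,-']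
--     BITS = {'1': 1, '2': 2, '3': 4}
--     mask = 0
--     for i in list:
--         mask |= BITS.get(i, 0)
--     return TABLE[mask]
-- ===== Notes on version B (the rewrite author's own statement) =====
-- stated objective: alternative
-- what changed: Instead of accumulating three string flag variables, B folds the list into a 3-bit presence bitmask and returns the precomputed descriptor from an 8-entry lookup table.
import Mathlib
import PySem

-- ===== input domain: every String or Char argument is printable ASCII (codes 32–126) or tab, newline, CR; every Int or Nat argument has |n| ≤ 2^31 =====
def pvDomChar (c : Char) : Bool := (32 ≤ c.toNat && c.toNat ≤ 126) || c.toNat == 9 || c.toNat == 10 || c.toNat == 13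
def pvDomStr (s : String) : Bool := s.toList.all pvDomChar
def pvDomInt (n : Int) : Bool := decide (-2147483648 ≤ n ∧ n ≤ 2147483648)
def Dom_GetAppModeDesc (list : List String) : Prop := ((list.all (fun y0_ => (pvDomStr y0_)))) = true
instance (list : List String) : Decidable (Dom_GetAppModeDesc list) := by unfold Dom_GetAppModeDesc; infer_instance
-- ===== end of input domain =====

-- B replaces A's three accumulated string flag variables with a single pass folding the
-- list into a 3-bit presence bitmask and an 8-entry lookup table of precomputed descriptors (alternative; same cost).

-- ===== PORT A =====
def GetAppModeDesc (list : List String) : String :=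
  let st := list.foldl (fun (s : String × String × String) i =>
    let a := if i = "1" then "*," else s.1
    let b := if i = "2" then "+," else s.2.1
    let c := if i = "3" then "-" else s.2.2
    (a, b, c)) ("", "", "")
  st.1 ++ st.2.1 ++ st.2.2

-- ===== PORT B =====
-- mask is a nonnegative 3-bit Python int, ported as Nat; mask < 8 always, so the
-- indexing TABLE[mask] never raises and List.getD is exact there.
def GetAppModeDesc_alt (list : List String) : String :=
  let TABLE : List String := ["", "*,", "+,", "*,+,", "-", "*,-", "+,-", "*,+,-"]
  let BITS : PySem.Dict String Nat := PySem.Dict.ofList [("1", 1), ("2", 2), ("3", 4)]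
  let mask : Nat := list.foldl (fun m i => m ||| (BITS.getD i 0)) 0
  TABLE.getD mask ""

-- ===== PRECONDITION & SPEC =====
def Spec_GetAppModeDesc (list : List String) (out : String) : Prop := out = GetAppModeDesc_alt list
instance (list : List String) (out : String) : Decidable (Spec_GetAppModeDesc list out) := by unfold Spec_GetAppModeDesc; infer_instance

-- ===== CLAIM (what is proved, stated in full; the proofs are below) =====
def Claim_equal_GetAppModeDesc : Prop := ∀ (list : List String), Dom_GetAppModeDesc list → Spec_GetAppModeDesc list (GetAppModeDesc list)

-- ===== LEMMAS AND PROOFS =====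
theorem flag_step (x y v d : String) (xs : List String) :
    (if xs.contains y = true then v else if x = y then v else d) =
    (if (y == x || xs.contains y) = true then v else d) := by
  by_cases hc : y ∈ xs
  · simp [hc]
  · by_cases hx : x = y
    · simp [hc, hx]
    · simp [hc, hx, Ne.symm hx]

theorem foldl_flags (l : List String) (a b c : String) :
    l.foldl (fun (s : String × String × String) i =>
      let a := if i = "1" then "*," else s.1
      let b := if i = "2" then "+," else s.2.1
      let c := if i = "3" then "-" else s.2.2
      (a, b, c)) (a, b, c)
    = ((if l.contains "1" then "*," else a),
       (if l.contains "2" then "+," else b),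
       (if l.contains "3" then "-" else c)) := by
  induction l generalizing a b c with
  | nil => simp
  | cons x xs ih =>
    simp only [List.foldl_cons, List.contains_cons, ih]
    exact Prod.ext (flag_step ..) (Prod.ext (flag_step ..) (flag_step ..))

theorem bits_getD (i : String) : (PySem.Dict.ofList [("1",(1:Nat)),("2",2),("3",4)]).getD i 0 =
    if i = "1" then 1 else if i = "2" then 2 else if i = "3" then 4 else 0 := by
  have h : PySem.Dict.ofList [("1",(1:Nat)),("2",2),("3",4)] = PySem.Dict.mk [("1",1),("2",2),("3",4)] := rfl
  rw [h]
  simp only [PySem.Dict.getD, PySem.Dict.get?_mk_cons]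
  by_cases h1 : i = "1" <;> by_cases h2 : i = "2" <;> by_cases h3 : i = "3" <;>
    simp_all [beq_iff_eq, @eq_comm String i, PySem.Dict.get?] <;> split_ifs <;> simp_all

theorem foldl_mask (l : List String) (m : Nat) :
    l.foldl (fun m i => m ||| ((PySem.Dict.ofList [("1", 1), ("2", 2), ("3", 4)]).getD i 0)) m
    = m ||| ((if l.contains "1" then 1 else 0)
        ||| (if l.contains "2" then 2 else 0)
        ||| (if l.contains "3" then 4 else 0)) := by
  induction l generalizing m with
  | nil => simp
  | cons x xs ih =>
    rw [List.foldl_cons, ih, bits_getD]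
    by_cases h1 : x = "1" <;> by_cases h2 : x = "2" <;> by_cases h3 : x = "3" <;>
      by_cases c1 : "1" ∈ xs <;> by_cases c2 : "2" ∈ xs <;> by_cases c3 : "3" ∈ xs <;>
      simp [h1, h2, h3, c1, c2, c3, Nat.lor_assoc] <;>
      simp [Ne.symm h1, Ne.symm h2, Ne.symm h3]

-- ===== VERDICT (by name: the statement is the Claim_ definition above) =====
theorem GetAppModeDesc_spec : Claim_equal_GetAppModeDesc := by
  intro l _
  unfold Spec_GetAppModeDesc GetAppModeDesc GetAppModeDesc_alt
  simp only [foldl_flags, foldl_mask]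
  by_cases c1 : "1" ∈ l <;> by_cases c2 : "2" ∈ l <;> by_cases c3 : "3" ∈ l <;>
    simp [c1, c2, c3]
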